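-- pv_equiv track=rewrite | github.com/Cheny-chui/NeatDemo | core/compress.py | verify_bisimulation
-- ===== SOURCE A (Python) =====
-- def get_label(node_id: str):
--     label = node_id.split('_')[0]
--     return label
--
-- def verify_bisimulation(graph: dict, node1: str, node2: str):
--     if get_label(node1) != get_label(node2):
--         return False
--     if node1 == node2:
--         return True
--     flag = False
--     # 对于所有的child1
--     for child1 in graph[node1]:
--         # 存在一个child2
--         for child2 in graph[node2]:
--             flag = verify_bisimulation(graph, child1, child2)
--             if flag:
--                 break
--     if not flag:
--         return False
--     flag = False
--     # 对于所有的child2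
--     for child2 in graph[node2]:
--         # 存在一个child1
--         for child1 in graph[node1]:
--             flag = verify_bisimulation(graph, child1, child2)
--             if flag:
--                 break
--     if not flag:
--         return False
--     return True
-- ===== SOURCE B (Python) =====
-- def get_label(node_id: str):
--     label = node_id.split('_')[0]
--     return label
--
-- def verify_bisimulation(graph: dict, node1: str, node2: str):
--     # Memoized: each (n1, n2) pair is evaluated at most once, turning the
--     # naive recursion into dynamic programming over node pairs.
--     cache = {}
--
--     def bisim(n1, n2):
--         key = (n1, n2)
--         if key in cache:
--             return cache[key]
--         if get_label(n1) != get_label(n2):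
--             result = False
--         elif n1 == n2:
--             result = True
--         else:
--             flag = False
--             for child1 in graph[n1]:
--                 for child2 in graph[n2]:
--                     flag = bisim(child1, child2)
--                     if flag:
--                         break
--             if not flag:
--                 result = False
--             else:
--                 flag = False
--                 for child2 in graph[n2]:
--                     for child1 in graph[n1]:
--                         flag = bisim(child1, child2)
--                         if flag:
--                             break
--                 result = flag
--         cache[key] = result
--         return result
--
--     return bisim(node1, node2)
-- ===== Notes on version B (the rewrite author's own statement) =====
-- stated objective: alternative
-- what changed: B memoizes the recursion on (node1, node2) pairs, turning A's naive recursion (which re-explores shared subtrees from scratch) into dynamic programming over node pairs; Pre_ excludes inputs where A raises KeyError on a missing key or recurses forever on a cycle (B does the same there), and, as an over-approximation, some graphs with a missing or cyclic part that A never actually visits because a child list is empty or a label check prunes first - on those both programs still return the same value.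
-- outside the precondition, e.g. on verify_bisimulation({'a_1': []}, 'a_1', 'a_2'): A returns False, B returns False
import Mathlib
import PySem

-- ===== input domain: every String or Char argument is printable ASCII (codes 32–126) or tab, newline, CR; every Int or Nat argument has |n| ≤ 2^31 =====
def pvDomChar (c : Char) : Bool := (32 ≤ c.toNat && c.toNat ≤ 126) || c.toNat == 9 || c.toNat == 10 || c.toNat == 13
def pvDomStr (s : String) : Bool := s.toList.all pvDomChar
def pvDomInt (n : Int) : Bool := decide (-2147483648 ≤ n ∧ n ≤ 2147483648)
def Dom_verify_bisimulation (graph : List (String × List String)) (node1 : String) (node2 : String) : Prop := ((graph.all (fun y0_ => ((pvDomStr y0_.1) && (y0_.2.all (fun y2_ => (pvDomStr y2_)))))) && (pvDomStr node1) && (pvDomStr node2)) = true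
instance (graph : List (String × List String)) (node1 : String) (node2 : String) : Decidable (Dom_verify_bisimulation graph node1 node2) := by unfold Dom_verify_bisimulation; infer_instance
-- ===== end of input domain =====

-- B memoizes the recursion on (node1, node2) pairs: dynamic programming over node pairs
-- instead of A's naive recursion, which re-explores shared subtrees from scratch.

-- shared helper: the module-level get_label (node_id.split('_')[0])
def pvLabel (s : String) : String := (((PySem.Str.split? s "_").getD []).headD "")

-- dict lookup graph[n]: first matching key of the association list; none = KeyError
def pvLookup : List (String × List String) → String → Option (List String)
  | [], _ => none
  | (k, v) :: rest, n => if k == n then some v else pvLookup rest n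

-- ===== PORT A =====
-- the inner 'for …: flag = rec(…); if flag: break' loop, carrying the flag
def pvBrk (r : String → Bool) : List String → Bool → Bool
  | [], flag => flag
  | c :: rest, _flag => let fl := r c; if fl then fl else pvBrk r rest fl

-- fuel-recursive transliteration of A; fuel 0 (default false) is never reached inside Pre_
def pvGoA (graph : List (String × List String)) : Nat → String → String → Bool
  | 0, _, _ => false
  | f+1, n1, n2 =>
    if pvLabel n1 ≠ pvLabel n2 then false
    else if n1 = n2 then true
    else
      match pvLookup graph n1, pvLookup graph n2 with
      | some cs1, some cs2 =>
        let flag1 := cs1.foldl (fun flag c1 => pvBrk (fun c2 => pvGoA graph f c1 c2) cs2 flag) false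
        if !flag1 then false
        else
          let flag2 := cs2.foldl (fun flag c2 => pvBrk (fun c1 => pvGoA graph f c1 c2) cs1 flag) false
          if !flag2 then false else true
      | _, _ => false   -- Python raises KeyError here (excluded by Pre_)

def verify_bisimulation (graph : List (String × List String)) (node1 : String) (node2 : String) : Bool :=
  pvGoA graph (graph.length + 1) node1 node2

-- ===== PORT B =====
-- B's inner break loop, threading the memo cache through the recursive calls
def pvBrkB (r : String → PySem.Dict (String × String) Bool → Bool × PySem.Dict (String × String) Bool) :
    List String → Bool → PySem.Dict (String × String) Bool → Bool × PySem.Dict (String × String) Bool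
  | [], flag, σ => (flag, σ)
  | c :: rest, _flag, σ =>
    let p := r c σ
    if p.1 then p else pvBrkB r rest p.1 p.2

-- fuel-recursive transliteration of B's memoized bisim; fuel 0 is never reached inside Pre_
def pvGoB (graph : List (String × List String)) :
    Nat → String → String → PySem.Dict (String × String) Bool → Bool × PySem.Dict (String × String) Bool
  | 0, _, _, σ => (false, σ)
  | f+1, n1, n2, σ =>
    match PySem.Dict.get? σ (n1, n2) with
    | some v => (v, σ)
    | none =>
      let p :=
        if pvLabel n1 ≠ pvLabel n2 then (false, σ)
        else if n1 = n2 then (true, σ)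
        else
          match pvLookup graph n1, pvLookup graph n2 with
          | some cs1, some cs2 =>
            let q1 := cs1.foldl (fun st c1 => pvBrkB (fun c2 τ => pvGoB graph f c1 c2 τ) cs2 st.1 st.2) (false, σ)
            if !q1.1 then (false, q1.2)
            else
              let q2 := cs2.foldl (fun st c2 => pvBrkB (fun c1 τ => pvGoB graph f c1 c2 τ) cs1 st.1 st.2) (false, q1.2)
              (q2.1, q2.2)
          | _, _ => (false, σ)   -- KeyError in Python B too (excluded by Pre_)
      (p.1, PySem.Dict.insert p.2 (n1, n2) p.1)

def verify_bisimulation_alt (graph : List (String × List String)) (node1 : String) (node2 : String) : Bool :=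
  (pvGoB graph (graph.length + 1) node1 node2 PySem.Dict.empty).1

-- ===== PRECONDITION & SPEC =====
def pvSuccs (graph : List (String × List String)) (n : String) : List String :=
  (List.lookup n graph).getD []

def pvStep (graph : List (String × List String)) (S : List String) : List String :=
  (S ++ S.flatMap (pvSuccs graph)).dedup

-- the node set reachable from S (graph.length + 2 closure steps suffice on the intended domain)
def pvReach (graph : List (String × List String)) (S : List String) : List String :=
  (pvStep graph)^[graph.length + 2] S

-- pvRank n = size of n's own reachable set; strictly decreasing along edges on acyclic graphs
def pvRank (graph : List (String × List String)) (n : String) : Nat :=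
  ((pvReach graph [n]).dedup).length

-- Pre_ over-approximates A's traversal: outside the two trivial root cases it requires every
-- node reachable from node1/node2 to be a present key and the reachable subgraph acyclic
-- (stated via the reachable set being succ-closed with a strictly edge-decreasing, bounded
-- rank — on an all-keys acyclic reachable part these conjuncts hold), because on a missing
-- key A raises KeyError and on a cycle it recurses forever (RecursionError); A's pruned
-- traversal can still return on some excluded graphs (an empty child list or a label
-- mismatch stops it before the bad part), and there B returns the same value.
def Pre_verify_bisimulation (graph : List (String × List String)) (node1 : String) (node2 : String) : Prop :=
  pvLabel node1 ≠ pvLabel node2 ∨ node1 = node2 ∨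
    (node1 ∈ pvReach graph [node1, node2] ∧ node2 ∈ pvReach graph [node1, node2] ∧
     (∀ n ∈ pvReach graph [node1, node2], n ∈ graph.map Prod.fst) ∧
     (∀ n ∈ pvReach graph [node1, node2], ∀ c ∈ pvSuccs graph n, c ∈ pvReach graph [node1, node2]) ∧
     (∀ n ∈ pvReach graph [node1, node2], ∀ c ∈ pvSuccs graph n, pvRank graph c < pvRank graph n) ∧
     (∀ n ∈ pvReach graph [node1, node2], pvRank graph n ≤ graph.length))
instance (graph : List (String × List String)) (node1 : String) (node2 : String) : Decidable (Pre_verify_bisimulation graph node1 node2) := by unfold Pre_verify_bisimulation; infer_instance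

def pvWitness_verify_bisimulation : (List (String × List String)) × String × String :=
  ([("a_1", ["a_2"]), ("a_2", [])], "a_1", "a_2")

def Spec_verify_bisimulation (graph : List (String × List String)) (node1 : String) (node2 : String) (out : Bool) : Prop := out = verify_bisimulation_alt graph node1 node2
instance (graph : List (String × List String)) (node1 : String) (node2 : String) (out : Bool) : Decidable (Spec_verify_bisimulation graph node1 node2 out) := by unfold Spec_verify_bisimulation; infer_instance

-- ===== CLAIM (what is proved, stated in full; the proofs are below) =====
def Claim_equal_verify_bisimulation : Prop := ∀ (graph : List (String × List String)) (node1 : String) (node2 : String), Dom_verify_bisimulation graph node1 node2 → Pre_verify_bisimulation graph node1 node2 → Spec_verify_bisimulation graph node1 node2 (verify_bisimulation graph node1 node2)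

-- ===== LEMMAS AND PROOFS =====

-- abbreviation for the hypotheses of the third Pre_ disjunct, over the fixed root set
def pvGood (graph : List (String × List String)) (R : List String) : Prop :=
  (∀ n ∈ R, n ∈ graph.map Prod.fst) ∧
  (∀ n ∈ R, ∀ c ∈ pvSuccs graph n, c ∈ R) ∧
  (∀ n ∈ R, ∀ c ∈ pvSuccs graph n, pvRank graph c < pvRank graph n) ∧
  (∀ n ∈ R, pvRank graph n ≤ graph.length)

theorem pvLookup_eq_lookup (graph : List (String × List String)) (n : String) :
    pvLookup graph n = List.lookup n graph := by
  induction graph with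
  | nil => rfl
  | cons p rest ih =>
    cases p with
    | mk k v =>
      simp only [pvLookup, List.lookup_cons, ih]
      by_cases h : k = n
      · simp [h]
      · have h' : (n == k) = false := by simp [Ne.symm h]
        simp [h, h']

theorem pvLookup_isSome_of_mem (graph : List (String × List String)) (n : String)
    (h : n ∈ graph.map Prod.fst) : (pvLookup graph n).isSome := by
  induction graph with
  | nil => simp at h
  | cons p rest ih =>
    cases p with
    | mk k v =>
      simp only [List.map_cons, List.mem_cons] at h
      by_cases hk : k = n
      · simp [pvLookup, hk]
      · simp only [pvLookup, beq_iff_eq, hk, if_false]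
        rcases h with h | h
        · exact absurd h.symm hk
        · exact ih h

theorem pvBrk_eq (r : String → Bool) (l : List String) (flag : Bool) :
    pvBrk r l flag = if l.isEmpty then flag else l.any r := by
  induction l generalizing flag with
  | nil => simp [pvBrk]
  | cons c rest ih =>
    simp only [pvBrk, List.any_cons, List.isEmpty_cons, if_false, Bool.false_eq_true]
    cases hc : r c with
    | true => simp
    | false =>
      simp only [if_false, Bool.false_eq_true, ih, Bool.false_or]
      cases rest <;> simp

-- fuel stability of A's recursion on the good region
theorem pvGoA_fuel_stable (graph : List (String × List String)) (R : List String)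
    (hg : pvGood graph R) :
    ∀ (f₁ f₂ : Nat) (a b : String), a ∈ R → b ∈ R →
      pvRank graph a < f₁ → pvRank graph a < f₂ →
      pvGoA graph f₁ a b = pvGoA graph f₂ a b := by
  intro f₁
  induction f₁ with
  | zero => intro f₂ a b _ _ h1 _; exact absurd h1 (Nat.not_lt_zero _)
  | succ f ih =>
    intro f₂ a b ha hb h1 h2
    cases f₂ with
    | zero => exact absurd h2 (Nat.not_lt_zero _)
    | succ g =>
      by_cases hl : pvLabel a ≠ pvLabel b
      · simp [pvGoA, hl]
      · by_cases he : a = b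
        · simp [pvGoA, he]
        · obtain ⟨hk, hc, hr, _⟩ := hg
          obtain ⟨cs1, hla⟩ := Option.isSome_iff_exists.mp (pvLookup_isSome_of_mem graph a (hk a ha))
          obtain ⟨cs2, hlb⟩ := Option.isSome_iff_exists.mp (pvLookup_isSome_of_mem graph b (hk b hb))
          have hsa : pvSuccs graph a = cs1 := by simp [pvSuccs, ← pvLookup_eq_lookup, hla]
          have hsb : pvSuccs graph b = cs2 := by simp [pvSuccs, ← pvLookup_eq_lookup, hlb]
          have key : ∀ c1 ∈ cs1, ∀ c2 ∈ cs2, pvGoA graph f c1 c2 = pvGoA graph g c1 c2 := by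
            intro c1 hc1 c2 hc2
            have hc1R : c1 ∈ R := hc a ha c1 (hsa ▸ hc1)
            have hc2R : c2 ∈ R := hc b hb c2 (hsb ▸ hc2)
            have hlt : pvRank graph c1 < pvRank graph a := hr a ha c1 (hsa ▸ hc1)
            exact ih g c1 c2 hc1R hc2R (by omega) (by omega)
          have e1 : cs1.foldl (fun flag c1 => pvBrk (fun c2 => pvGoA graph f c1 c2) cs2 flag) false
              = cs1.foldl (fun flag c1 => pvBrk (fun c2 => pvGoA graph g c1 c2) cs2 flag) false := by
            apply PySem.List.foldl_congr_mem
            intro acc c1 hc1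
            rw [pvBrk_eq, pvBrk_eq, PySem.List.any_congr_mem (fun c2 hc2 => key c1 hc1 c2 hc2)]
          have e2 : cs2.foldl (fun flag c2 => pvBrk (fun c1 => pvGoA graph f c1 c2) cs1 flag) false
              = cs2.foldl (fun flag c2 => pvBrk (fun c1 => pvGoA graph g c1 c2) cs1 flag) false := by
            apply PySem.List.foldl_congr_mem
            intro acc c2 hc2
            rw [pvBrk_eq, pvBrk_eq, PySem.List.any_congr_mem (fun c1 hc1 => key c1 hc1 c2 hc2)]
          simp only [pvGoA, if_neg hl, if_neg he, hla, hlb, e1, e2]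

-- B's inner break loop computes A's pure break loop and preserves any cache invariant
theorem pvBrkB_spec (r : String → PySem.Dict (String × String) Bool → Bool × PySem.Dict (String × String) Bool)
    (rp : String → Bool) (P : PySem.Dict (String × String) Bool → Prop) (l : List String)
    (h : ∀ c ∈ l, ∀ σ, P σ → (r c σ).1 = rp c ∧ P (r c σ).2) :
    ∀ (flag : Bool) (σ : PySem.Dict (String × String) Bool), P σ →
      (pvBrkB r l flag σ).1 = pvBrk rp l flag ∧ P (pvBrkB r l flag σ).2 := by
  induction l with
  | nil => intro flag σ hP; exact ⟨rfl, hP⟩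
  | cons c rest ih =>
    intro flag σ hP
    obtain ⟨hv, hP'⟩ := h c (by simp) σ hP
    rcases hF : r c σ with ⟨v, σ'⟩
    rw [hF] at hv hP'
    simp only at hv
    subst hv
    simp only [pvBrkB, pvBrk, hF]
    cases hrp : rp c with
    | true => constructor <;> simp [hP']
    | false =>
      have t := ih (fun c' hc' => h c' (by simp [hc'])) false σ' hP'
      constructor <;> simp [t.1, t.2]

-- B's outer flag fold computes A's pure flag fold and preserves any cache invariant
theorem pvFoldB_spec (F : String → Bool → PySem.Dict (String × String) Bool → Bool × PySem.Dict (String × String) Bool)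
    (Fp : String → Bool → Bool) (P : PySem.Dict (String × String) Bool → Prop) (l : List String)
    (h : ∀ c ∈ l, ∀ flag σ, P σ → (F c flag σ).1 = Fp c flag ∧ P (F c flag σ).2) :
    ∀ (flag : Bool) (σ : PySem.Dict (String × String) Bool), P σ →
      (l.foldl (fun st c => F c st.1 st.2) (flag, σ)).1 = l.foldl (fun fl c => Fp c fl) flag ∧
      P (l.foldl (fun st c => F c st.1 st.2) (flag, σ)).2 := by
  induction l with
  | nil => intro flag σ hP; exact ⟨rfl, hP⟩
  | cons c rest ih =>
    intro flag σ hP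
    obtain ⟨hv, hP'⟩ := h c (by simp) flag σ hP
    rcases hF : F c flag σ with ⟨v, σ'⟩
    rw [hF] at hv hP'
    simp only at hv
    subst hv
    simp only [List.foldl_cons, hF]
    exact ih (fun c' hc' => h c' (by simp [hc'])) (Fp c flag) σ' hP'

-- the memo invariant: every cached value is the fuel-stable value of A's recursion
def pvInv (graph : List (String × List String)) (σ : PySem.Dict (String × String) Bool) : Prop :=
  ∀ x y v, PySem.Dict.get? σ (x, y) = some v → v = pvGoA graph (pvRank graph x + 1) x y

theorem pvGoB_correct (graph : List (String × List String)) (R : List String)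
    (hg : pvGood graph R) :
    ∀ (f : Nat) (a b : String) (σ : PySem.Dict (String × String) Bool),
      a ∈ R → b ∈ R → pvRank graph a < f → pvInv graph σ →
      (pvGoB graph f a b σ).1 = pvGoA graph (pvRank graph a + 1) a b ∧
        pvInv graph (pvGoB graph f a b σ).2 := by
  intro f
  induction f with
  | zero => intro a b σ _ _ h1 _; exact absurd h1 (Nat.not_lt_zero _)
  | succ f ih =>
    intro a b σ ha hb h1 hInv
    -- the insertion step preserves the invariant once the computed value is correct
    have hins : ∀ (τ : PySem.Dict (String × String) Bool) (w : Bool),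
        pvInv graph τ → w = pvGoA graph (pvRank graph a + 1) a b →
        pvInv graph (PySem.Dict.insert τ (a, b) w) := by
      intro τ w hτ hw x y v hget
      rw [PySem.Dict.get?_insert] at hget
      by_cases hxy : (x, y) = (a, b)
      · rw [if_pos hxy] at hget
        obtain ⟨hx, hy⟩ := Prod.mk.injEq .. ▸ hxy
        cases hget
        subst hx; subst hy
        exact hw
      · rw [if_neg hxy] at hget
        exact hτ x y v hget
    cases hhit : PySem.Dict.get? σ (a, b) with
    | some v =>
      have hv := hInv a b v hhit
      simp only [pvGoB, hhit]
      exact ⟨hv, hInv⟩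
    | none =>
      by_cases hl : pvLabel a ≠ pvLabel b
      · have hval : pvGoA graph (pvRank graph a + 1) a b = false := by simp [pvGoA, hl]
        simp only [pvGoB, hhit, if_pos hl]
        exact ⟨hval.symm, hins σ false hInv hval.symm⟩
      · by_cases he : a = b
        · have hval : pvGoA graph (pvRank graph a + 1) a b = true := by simp [pvGoA, he]
          simp only [pvGoB, hhit, if_neg hl, if_pos he]
          exact ⟨hval.symm, hins σ true hInv hval.symm⟩
        · obtain ⟨cs1, hla⟩ := Option.isSome_iff_exists.mp (pvLookup_isSome_of_mem graph a (hg.1 a ha))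
          obtain ⟨cs2, hlb⟩ := Option.isSome_iff_exists.mp (pvLookup_isSome_of_mem graph b (hg.1 b hb))
          have hsa : pvSuccs graph a = cs1 := by simp [pvSuccs, ← pvLookup_eq_lookup, hla]
          have hsb : pvSuccs graph b = cs2 := by simp [pvSuccs, ← pvLookup_eq_lookup, hlb]
          have hsub : ∀ c1 ∈ cs1, ∀ c2 ∈ cs2, ∀ τ, pvInv graph τ →
              (pvGoB graph f c1 c2 τ).1 = pvGoA graph (pvRank graph a) c1 c2 ∧
              pvInv graph (pvGoB graph f c1 c2 τ).2 := by
            intro c1 hc1 c2 hc2 τ hτ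
            have hm1 : c1 ∈ R := hg.2.1 a ha c1 (hsa ▸ hc1)
            have hm2 : c2 ∈ R := hg.2.1 b hb c2 (hsb ▸ hc2)
            have hlt : pvRank graph c1 < pvRank graph a := hg.2.2.1 a ha c1 (hsa ▸ hc1)
            obtain ⟨hv, hτ'⟩ := ih c1 c2 τ hm1 hm2 (by omega) hτ
            refine ⟨?_, hτ'⟩
            rw [hv]
            exact pvGoA_fuel_stable graph R hg _ _ c1 c2 hm1 hm2 (Nat.lt_succ_self _) hlt
          -- first fold
          have hF1 : ∀ c1 ∈ cs1, ∀ flag τ, pvInv graph τ →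
              ((pvBrkB (fun c2 τ' => pvGoB graph f c1 c2 τ') cs2 flag τ).1
                 = pvBrk (fun c2 => pvGoA graph (pvRank graph a) c1 c2) cs2 flag ∧
               pvInv graph (pvBrkB (fun c2 τ' => pvGoB graph f c1 c2 τ') cs2 flag τ).2) := by
            intro c1 hc1 flag τ hτ
            exact pvBrkB_spec _ _ _ cs2 (fun c2 hc2 τ' hτ' => hsub c1 hc1 c2 hc2 τ' hτ') flag τ hτ
          have hq1 := pvFoldB_spec
            (fun c1 flag τ => pvBrkB (fun c2 τ' => pvGoB graph f c1 c2 τ') cs2 flag τ)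
            (fun c1 flag => pvBrk (fun c2 => pvGoA graph (pvRank graph a) c1 c2) cs2 flag)
            (pvInv graph) cs1 hF1 false σ hInv
          simp only at hq1
          -- second fold, from the cache left by the first
          have hF2 : ∀ c2 ∈ cs2, ∀ flag τ, pvInv graph τ →
              ((pvBrkB (fun c1 τ' => pvGoB graph f c1 c2 τ') cs1 flag τ).1
                 = pvBrk (fun c1 => pvGoA graph (pvRank graph a) c1 c2) cs1 flag ∧
               pvInv graph (pvBrkB (fun c1 τ' => pvGoB graph f c1 c2 τ') cs1 flag τ).2) := by
            intro c2 hc2 flag τ hτ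
            exact pvBrkB_spec _ _ _ cs1 (fun c1 hc1 τ' hτ' => hsub c1 hc1 c2 hc2 τ' hτ') flag τ hτ
          have hq2 := pvFoldB_spec
            (fun c2 flag τ => pvBrkB (fun c1 τ' => pvGoB graph f c1 c2 τ') cs1 flag τ)
            (fun c2 flag => pvBrk (fun c1 => pvGoA graph (pvRank graph a) c1 c2) cs1 flag)
            (pvInv graph) cs2 hF2 false
            (cs1.foldl (fun st c1 => pvBrkB (fun c2 τ' => pvGoB graph f c1 c2 τ') cs2 st.1 st.2) (false, σ)).2
            hq1.2
          simp only at hq2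
          -- A's value, unfolded once
          have hAval : pvGoA graph (pvRank graph a + 1) a b =
              (let flag1 := cs1.foldl (fun flag c1 => pvBrk (fun c2 => pvGoA graph (pvRank graph a) c1 c2) cs2 flag) false
               if !flag1 then false
               else
                 let flag2 := cs2.foldl (fun flag c2 => pvBrk (fun c1 => pvGoA graph (pvRank graph a) c1 c2) cs1 flag) false
                 if !flag2 then false else true) := by
            simp only [pvGoA, if_neg hl, if_neg he, hla, hlb]
          simp only [pvGoB, hhit, if_neg hl, if_neg he, hla, hlb]
          rw [hAval]
          simp only [hq1.1]
          cases hflag1 : cs1.foldl (fun flag c1 => pvBrk (fun c2 => pvGoA graph (pvRank graph a) c1 c2) cs2 flag) false with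
          | false =>
            simp only [Bool.not_false, if_true]
            exact ⟨by simp, hins _ false hq1.2 (by rw [hAval, hflag1]; simp)⟩
          | true =>
            simp only [Bool.not_true, Bool.false_eq_true, if_false]
            rw [hq2.1]
            have hA2 : pvGoA graph (pvRank graph a + 1) a b =
                cs2.foldl (fun flag c2 => pvBrk (fun c1 => pvGoA graph (pvRank graph a) c1 c2) cs1 flag) false := by
              rw [hAval, hflag1]
              cases cs2.foldl (fun flag c2 => pvBrk (fun c1 => pvGoA graph (pvRank graph a) c1 c2) cs1 flag) false <;> simp
            constructor
            · cases cs2.foldl (fun flag c2 => pvBrk (fun c1 => pvGoA graph (pvRank graph a) c1 c2) cs1 flag) false <;>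
                simp
            · exact hins _ _ hq2.2 hA2.symm

-- ===== VERDICT (by name: the statement is the Claim_ definition above) =====
theorem verify_bisimulation_spec : Claim_equal_verify_bisimulation := by
  intro graph node1 node2 _ hpre
  unfold Spec_verify_bisimulation verify_bisimulation verify_bisimulation_alt
  rcases hpre with hl | he | ⟨h1R, h2R, hk, hc, hr, hbnd⟩
  · simp [pvGoA, pvGoB, hl, PySem.Dict.get?_empty]
  · subst he
    simp [pvGoA, pvGoB, PySem.Dict.get?_empty]
  · have hg : pvGood graph (pvReach graph [node1, node2]) := ⟨hk, hc, hr, hbnd⟩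
    have hInv0 : pvInv graph PySem.Dict.empty := by
      intro x y v hgetv
      rw [PySem.Dict.get?_empty] at hgetv
      cases hgetv
    have hrank1 : pvRank graph node1 < graph.length + 1 := by have := hbnd node1 h1R; omega
    obtain ⟨hval, _⟩ := pvGoB_correct graph _ hg (graph.length + 1) node1 node2 PySem.Dict.empty h1R h2R hrank1 hInv0
    rw [hval]
    exact pvGoA_fuel_stable graph _ hg _ _ node1 node2 h1R h2R hrank1 (Nat.lt_succ_self _)
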